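-- pv_equiv track=rewrite | github.com/qisumi/TS002-clean-data | src/cli/visualize_features.py | find_shared_columns
-- ===== SOURCE A (Python) =====
-- def find_shared_columns(selected_by_dataset: dict[str, list[str]]) -> list[str]:
--     shared_columns: set[str] | None = None
--     for columns in selected_by_dataset.values():
--         if shared_columns is None:
--             shared_columns = set(columns)
--         else:
--             shared_columns &= set(columns)
--     return sorted(shared_columns or set())
-- ===== SOURCE B (Python) =====
-- def find_shared_columns(selected_by_dataset: dict[str, list[str]]) -> list[str]:
--     n = len(selected_by_dataset)
--     counts: dict[str, int] = {}
--     for columns in selected_by_dataset.values():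
--         for col in set(columns):
--             counts[col] = counts.get(col, 0) + 1
--     return sorted(col for col, k in counts.items() if k == n)
-- ===== Notes on version B (the rewrite author's own statement) =====
-- stated objective: alternative
-- what changed: Replaces the accumulated running set-intersection with a single count-then-filter pass: each column is counted once per dataset (after per-dataset dedup) and the columns whose count equals the number of datasets are returned sorted.
import Mathlib
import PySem

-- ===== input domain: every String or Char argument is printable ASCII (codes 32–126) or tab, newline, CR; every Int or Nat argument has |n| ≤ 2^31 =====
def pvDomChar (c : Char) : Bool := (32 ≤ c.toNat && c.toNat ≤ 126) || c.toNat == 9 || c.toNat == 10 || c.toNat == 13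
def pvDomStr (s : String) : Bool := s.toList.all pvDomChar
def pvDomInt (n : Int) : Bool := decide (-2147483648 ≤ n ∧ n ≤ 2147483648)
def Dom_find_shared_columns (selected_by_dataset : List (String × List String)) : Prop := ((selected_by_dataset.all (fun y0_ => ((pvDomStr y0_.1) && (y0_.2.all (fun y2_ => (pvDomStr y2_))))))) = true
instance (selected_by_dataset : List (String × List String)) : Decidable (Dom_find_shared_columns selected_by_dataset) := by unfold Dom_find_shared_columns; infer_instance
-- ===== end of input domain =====

-- B replaces the running set-intersection with one count-then-filter pass (alternative decomposition, same cost).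

-- ===== PORT A =====
def find_shared_columns (selected_by_dataset : List (String × List String)) : List String :=
  let d := PySem.Dict.ofList selected_by_dataset
  let shared : Option (PySem.Set String) :=
    d.values.foldl (fun acc columns =>
      match acc with
      | none => some (PySem.Set.ofList columns)
      | some s => some (PySem.Set.inter s (PySem.Set.ofList columns))) none
  PySem.List.sorted
    (match shared with
     | none => PySem.Set.empty
     | some s => if s = [] then PySem.Set.empty else s)   -- 'shared_columns or set()'
    (fun x => x) false

-- ===== PORT B =====
def find_shared_columns_alt (selected_by_dataset : List (String × List String)) : List String :=
  let d := PySem.Dict.ofList selected_by_dataset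
  let n : Int := d.size
  let counts : PySem.Dict String Int :=
    d.values.foldl (fun c columns =>
      (PySem.Set.ofList columns).foldl (fun c col => c.insert col (c.getD col 0 + 1)) c)
      PySem.Dict.empty
  PySem.List.sorted ((counts.items.filter (fun p => p.2 == n)).map Prod.fst) (fun x => x) false

-- ===== PRECONDITION & SPEC =====
def Spec_find_shared_columns (selected_by_dataset : List (String × List String)) (out : List String) : Prop := out = find_shared_columns_alt selected_by_dataset
instance (selected_by_dataset : List (String × List String)) (out : List String) : Decidable (Spec_find_shared_columns selected_by_dataset out) := by unfold Spec_find_shared_columns; infer_instance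

-- ===== CLAIM (what is proved, stated in full; the proofs are below) =====
def Claim_equal_find_shared_columns : Prop := ∀ (selected_by_dataset : List (String × List String)), Dom_find_shared_columns selected_by_dataset → Spec_find_shared_columns selected_by_dataset (find_shared_columns selected_by_dataset)

-- ===== LEMMAS AND PROOFS =====

-- A's loop, once started from a set s, is a plain fold of intersections.
theorem foldl_option_inter (vals : List (List String)) (s : PySem.Set String) :
    vals.foldl (fun acc columns =>
      match acc with
      | none => some (PySem.Set.ofList columns)
      | some t => some (PySem.Set.inter t (PySem.Set.ofList columns))) (some s)
    = some (vals.foldl (fun t columns => PySem.Set.inter t (PySem.Set.ofList columns)) s) := by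
  induction vals generalizing s with
  | nil => rfl
  | cons c rest ih => simp [List.foldl, ih]

theorem mem_foldl_inter (vals : List (List String)) (s : PySem.Set String) (x : String) :
    x ∈ vals.foldl (fun t columns => PySem.Set.inter t (PySem.Set.ofList columns)) s
      ↔ x ∈ s ∧ ∀ cs ∈ vals, x ∈ cs := by
  induction vals generalizing s with
  | nil => simp
  | cons c rest ih =>
    simp [List.foldl, ih, PySem.Set.mem_inter, PySem.Set.mem_ofList]
    tauto

theorem nodup_foldl_inter (vals : List (List String)) (s : PySem.Set String) (hs : s.Nodup) :
    (vals.foldl (fun t columns => PySem.Set.inter t (PySem.Set.ofList columns)) s).Nodup := by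
  induction vals generalizing s with
  | nil => exact hs
  | cons c rest ih => exact ih _ (PySem.Set.nodup_inter _ _ hs)

-- a fold over a flatMap is the nested fold
theorem foldl_flatMap_eq {α β γ : Type} (l : List β) (g : β → List α) (f : γ → α → γ) (init : γ) :
    (l.flatMap g).foldl f init = l.foldl (fun acc b => (g b).foldl f acc) init := by
  induction l generalizing init with
  | nil => rfl
  | cons c rest ih => simp [List.foldl_append, ih]

-- B's nested counting loop is Counter over the concatenation of the deduped lists.
theorem counts_eq_counter (vals : List (List String)) :
    vals.foldl (fun c columns =>
      (PySem.Set.ofList columns).foldl (fun c col => c.insert col (c.getD col 0 + 1)) c)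
      PySem.Dict.empty
    = PySem.Dict.counter (vals.flatMap (fun columns => PySem.Set.ofList columns)) := by
  rw [← PySem.Dict.foldl_insert_getD_add_one_eq_counter, foldl_flatMap_eq]

theorem count_flat (vals : List (List String)) (x : String) :
    (vals.flatMap (fun columns => PySem.Set.ofList columns)).count x
    = vals.countP (fun cs => decide (x ∈ cs)) := by
  induction vals with
  | nil => rfl
  | cons c rest ih =>
    simp only [List.flatMap_cons, List.count_append, List.countP_cons, ih]
    by_cases h : x ∈ c
    · have h1 : (PySem.Set.ofList c).count x = 1 :=
        List.count_eq_one_of_mem (PySem.Set.nodup_ofList c) ((PySem.Set.mem_ofList _ _).mpr h)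
      simp [h]
      omega
    · have h0 : (PySem.Set.ofList c).count x = 0 := by
        simp [List.count_eq_zero, PySem.Set.mem_ofList, h]
      simp [h0, h]

-- B's pre-sort list, rewritten through the Counter lemmas
theorem selected_eq (vals : List (List String)) (n : Int) :
    ((PySem.Dict.counter (vals.flatMap (fun columns => PySem.Set.ofList columns))).items.filter
        (fun p => p.2 == n)).map Prod.fst
    = (PySem.Set.ofList (vals.flatMap (fun columns => PySem.Set.ofList columns))).filter
        (fun k => ((vals.flatMap (fun columns => PySem.Set.ofList columns)).count k : Int) == n) := by
  rw [PySem.Dict.items_counter, List.filter_map, List.map_map]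
  simp [Function.comp_def]

theorem mem_selected (vals : List (List String)) (x : String) :
    (x ∈ (PySem.Set.ofList (vals.flatMap (fun columns => PySem.Set.ofList columns))).filter
        (fun k => ((vals.flatMap (fun columns => PySem.Set.ofList columns)).count k : Int) == (vals.length : Int)))
    ↔ (vals ≠ [] ∧ ∀ cs ∈ vals, x ∈ cs) := by
  rw [List.mem_filter]
  rw [PySem.Set.mem_ofList, beq_iff_eq, count_flat]
  constructor
  · rintro ⟨hmem, hcnt⟩
    have : vals.countP (fun cs => decide (x ∈ cs)) = vals.length := by exact_mod_cast hcnt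
    refine ⟨?_, fun cs hcs => by simpa using List.countP_eq_length.mp this cs hcs⟩
    rintro rfl; simp at hmem
  · rintro ⟨hne, hall⟩
    obtain ⟨c, rest, rfl⟩ : ∃ c rest, vals = c :: rest := by
      cases vals with
      | nil => exact absurd rfl hne
      | cons c rest => exact ⟨c, rest, rfl⟩
    refine ⟨?_, ?_⟩
    · exact List.mem_flatMap.mpr ⟨c, by simp, (PySem.Set.mem_ofList _ _).mpr (hall c (by simp))⟩
    · exact_mod_cast List.countP_eq_length.mpr (fun cs hcs => by simpa using hall cs hcs)

-- ===== VERDICT (by name: the statement is the Claim_ definition above) =====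
theorem find_shared_columns_spec : Claim_equal_find_shared_columns := by
  intro l _
  unfold Spec_find_shared_columns find_shared_columns find_shared_columns_alt
  simp only []
  rw [counts_eq_counter, selected_eq]
  have hn : ((PySem.Dict.ofList l).size : Int) = (((PySem.Dict.ofList l).values.length : Nat) : Int) := by
    simp [PySem.Dict.size, PySem.Dict.values]
  rw [hn]
  cases hv : (PySem.Dict.ofList l).values with
  | nil => rfl
  | cons c rest =>
    simp only [List.foldl_cons]
    rw [foldl_option_inter]
    set flat := (c :: rest).flatMap (fun columns => PySem.Set.ofList columns) with hflat
    set S := rest.foldl (fun t columns => PySem.Set.inter t (PySem.Set.ofList columns)) (PySem.Set.ofList c) with hS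
    set sel := (PySem.Set.ofList flat).filter (fun k => ((flat.count k : Int) == ((c :: rest).length : Int))) with hsel
    have hmemS : ∀ x, x ∈ S ↔ (∀ cs ∈ (c :: rest), x ∈ cs) := by
      intro x
      rw [hS, mem_foldl_inter, PySem.Set.mem_ofList]
      simp
    have hmemsel : ∀ x, x ∈ sel ↔ (∀ cs ∈ (c :: rest), x ∈ cs) := by
      intro x
      rw [hsel, mem_selected]
      simp
    have hperm : S.Perm sel := by
      rw [List.perm_ext_iff_of_nodup
        (nodup_foldl_inter _ _ (PySem.Set.nodup_ofList c))
        ((PySem.Set.nodup_ofList flat).filter _)]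
      intro a; rw [hmemS, hmemsel]
    show PySem.List.sorted (if S = [] then PySem.Set.empty else S) (fun x => x) false
        = PySem.List.sorted sel (fun x => x) false
    by_cases hSe : S = []
    · have hsel_nil : sel = [] := ((hSe ▸ hperm : ([] : List String).Perm sel).symm).eq_nil
      rw [if_pos hSe, hsel_nil]
      rfl
    · simp only [if_neg hSe]
      exact PySem.List.sorted_eq_sorted_of_perm _ _ _ (fun a b h => h) hperm
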